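-- pv_equiv track=rewrite | github.com/aguayo-co/BBL-MEJORAS-PRUEBAS | search_engine/functions/es_frontend_helpers.py | get_subqueries
-- ===== SOURCE A (Python) =====
-- def get_subqueries(boolean_queries):
--     """
--     Clasifica los queries para ser usados por elasticsearch.
--
--     Divide los boolean queries según los 'or' operators.
--
--     Clasifica los grupos de queries obtenidos según su ubicación en el
--     query final de búsqueda de elasticsearch.
--     """
--     if boolean_queries is None:
--         return None
--
--     subquery_index = 0
--     subqueries = [[]]
--     for loop_index, boolean_query in enumerate(boolean_queries):
--         if boolean_query and boolean_query["is_or"] and loop_index > 0: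
--             subquery_index += 1
--             subqueries.append([])
--             continue
--
--         subqueries[subquery_index].append(boolean_query)
--
--     return subqueries
-- ===== SOURCE B (Python) =====
-- def get_subqueries(boolean_queries):
--     """Split boolean queries into subgroups at 'or' separators (slice-based)."""
--     if boolean_queries is None:
--         return None
--     items = list(boolean_queries)
--     splits = [i for i, q in enumerate(items) if q and q["is_or"] and i > 0]
--     result = []
--     prev = 0
--     for s in splits:
--         result.append(items[prev:s])
--         prev = s + 1
--     result.append(items[prev:])
--     return result
-- ===== Notes on version B (the rewrite author's own statement) =====
-- stated objective: alternative
-- what changed: A threads a mutable group index through one loop, appending each element into subqueries[subquery_index]; B first collects the positions of the 'or' separators in one scan and then builds the groups by slicing the list between consecutive separator positions.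
-- outside the precondition, e.g. on get_subqueries([{'x': True}]): A raises KeyError, B raises KeyError
import Mathlib
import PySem

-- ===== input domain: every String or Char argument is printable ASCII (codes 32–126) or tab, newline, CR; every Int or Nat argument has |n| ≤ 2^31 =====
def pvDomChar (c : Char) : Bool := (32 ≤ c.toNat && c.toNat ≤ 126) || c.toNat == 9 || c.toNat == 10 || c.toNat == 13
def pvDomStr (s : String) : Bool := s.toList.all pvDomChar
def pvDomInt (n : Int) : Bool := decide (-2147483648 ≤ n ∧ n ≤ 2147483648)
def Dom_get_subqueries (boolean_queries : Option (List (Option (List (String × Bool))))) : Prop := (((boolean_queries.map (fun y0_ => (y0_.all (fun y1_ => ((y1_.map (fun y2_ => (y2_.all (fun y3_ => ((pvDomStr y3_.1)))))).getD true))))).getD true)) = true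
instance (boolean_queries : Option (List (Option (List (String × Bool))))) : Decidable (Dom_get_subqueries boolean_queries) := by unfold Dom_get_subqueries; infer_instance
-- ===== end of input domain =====

-- B replaces A's index-stateful single loop (append into subqueries[subquery_index])
-- by a two-phase decomposition: collect the separator indices, then slice the list
-- between consecutive separators.  Objective: alternative decomposition (same cost).

-- `bool(q)` for an Optional dict: None and {} are falsy
def pvTruthy (q : Option (List (String × Bool))) : Bool :=
  match q with | none => false | some d => !d.isEmpty

-- `q["is_or"]`: first-match lookup; total via default `false` — exact under Pre_
-- (Python raises KeyError on a truthy dict without the key; Pre_ excludes those)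
def pvIsOr (q : Option (List (String × Bool))) : Bool :=
  match q with | none => false | some d => (d.lookup "is_or").getD false

-- ===== PORT A =====
def get_subqueries (boolean_queries : Option (List (Option (List (String × Bool))))) : Option (List (List (Option (List (String × Bool))))) :=
  match boolean_queries with
  | none => none
  | some qs =>
    let st := (PySem.List.enumerate qs 0).foldl
      (fun (st : Nat × List (List (Option (List (String × Bool))))) p =>
        if pvTruthy p.2 && pvIsOr p.2 && decide (0 < p.1) then
          (st.1 + 1, st.2 ++ [[]])
        else
          (st.1, st.2.modify st.1 (fun g => g ++ [p.2])))
      (0, [[]])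
    some st.2

-- ===== PORT B =====
def get_subqueries_alt (boolean_queries : Option (List (Option (List (String × Bool))))) : Option (List (List (Option (List (String × Bool))))) :=
  match boolean_queries with
  | none => none
  | some items =>
    let splits := ((PySem.List.enumerate items 0).filter
        (fun p => pvTruthy p.2 && pvIsOr p.2 && decide (0 < p.1))).map (·.1)
    let st := splits.foldl
      (fun (st : Int × List (List (Option (List (String × Bool))))) s =>
        (s + 1, st.2 ++ [PySem.List.slice items (some st.1) (some s)]))
      (0, [])
    some (st.2 ++ [PySem.List.slice items (some st.1) none])

-- ===== PRECONDITION & SPEC =====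
-- Pre_ excludes exactly the inputs where Python A raises KeyError: a truthy
-- (non-empty) dict element without the key "is_or".
def Pre_get_subqueries (boolean_queries : Option (List (Option (List (String × Bool))))) : Prop :=
  ((boolean_queries.getD []).all
    (fun q => (q.getD []).isEmpty || ((q.getD []).lookup "is_or").isSome)) = true
instance (boolean_queries : Option (List (Option (List (String × Bool))))) : Decidable (Pre_get_subqueries boolean_queries) := by unfold Pre_get_subqueries; infer_instance

def pvWitness_get_subqueries : (Option (List (Option (List (String × Bool))))) :=
  some [some [("is_or", false)], none, some [("is_or", true)], some []]

def Spec_get_subqueries (boolean_queries : Option (List (Option (List (String × Bool))))) (out : Option (List (List (Option (List (String × Bool)))))) : Prop := out = get_subqueries_alt boolean_queries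
instance (boolean_queries : Option (List (Option (List (String × Bool))))) (out : Option (List (List (Option (List (String × Bool)))))) : Decidable (Spec_get_subqueries boolean_queries out) := by unfold Spec_get_subqueries; infer_instance

-- ===== CLAIM (what is proved, stated in full; the proofs are below) =====
def Claim_equal_get_subqueries : Prop := ∀ (boolean_queries : Option (List (Option (List (String × Bool))))), Dom_get_subqueries boolean_queries → Pre_get_subqueries boolean_queries → Spec_get_subqueries boolean_queries (get_subqueries boolean_queries)

-- ===== LEMMAS AND PROOFS =====

-- Reference grouping function: split the tail of the list (indices ≥ 1) at separators.
def pvG (cur : List (Option (List (String × Bool)))) :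
    List (Option (List (String × Bool))) → List (List (Option (List (String × Bool))))
  | [] => [cur]
  | q :: qs => if pvTruthy q && pvIsOr q then cur :: pvG [] qs else pvG (cur ++ [q]) qs

theorem pv_modify_last {α : Type} (l : List α) (x : α) (f : α → α) :
    (l ++ [x]).modify l.length f = l ++ [f x] := by
  induction l with
  | nil => rfl
  | cons a t ih => simpa using ih

theorem pv_A_loop (qs : List (Option (List (String × Bool)))) :
    ∀ (i : Int) (done : List (List (Option (List (String × Bool)))))
      (cur : List (Option (List (String × Bool)))), 1 ≤ i →
    ((PySem.List.enumerate qs i).foldl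
      (fun (st : Nat × List (List (Option (List (String × Bool))))) p =>
        if pvTruthy p.2 && pvIsOr p.2 && decide (0 < p.1) then
          (st.1 + 1, st.2 ++ [[]])
        else
          (st.1, st.2.modify st.1 (fun g => g ++ [p.2])))
      (done.length, done ++ [cur])).2 = done ++ pvG cur qs := by
  induction qs with
  | nil =>
    intro i done cur hi
    simp [PySem.List.enumerate_nil, pvG]
  | cons q qs ih =>
    intro i done cur hi
    rw [PySem.List.enumerate_cons, List.foldl_cons]
    have h0 : decide ((0:Int) < i) = true := by simp; omega
    by_cases hc : (pvTruthy q && pvIsOr q) = true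
    · simp only [hc, h0, Bool.true_and, if_true]
      have := ih (i+1) (done ++ [cur]) [] (by omega)
      simp only [List.length_append, List.length_singleton] at this
      simpa [pvG, hc] using this
    · simp only [hc, h0]
      rw [if_neg (by simp_all)]
      have hm := pv_modify_last done cur (fun g => g ++ [q])
      simp only [hm]
      have := ih (i+1) done (cur ++ [q]) (by omega)
      simpa [pvG, hc] using this

theorem pv_B_loop (qs : List (Option (List (String × Bool)))) :
    ∀ (items : List (Option (List (String × Bool)))) (i prev : Int)
      (R : List (List (Option (List (String × Bool))))),
    0 ≤ prev → prev ≤ i → 1 ≤ i → items.drop i.toNat = qs →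
    (let st := (((PySem.List.enumerate qs i).filter
        (fun p => pvTruthy p.2 && pvIsOr p.2 && decide (0 < p.1))).map (·.1)).foldl
      (fun (st : Int × List (List (Option (List (String × Bool))))) s =>
        (s + 1, st.2 ++ [PySem.List.slice items (some st.1) (some s)]))
      (prev, R)
     st.2 ++ [PySem.List.slice items (some st.1) none])
    = R ++ pvG ((items.drop prev.toNat).take (i.toNat - prev.toNat)) qs := by
  induction qs with
  | nil =>
    intro items i prev R hp hpi hi hdrop
    simp only [PySem.List.enumerate_nil, List.filter_nil, List.map_nil, List.foldl_nil]
    rw [PySem.List.slice_from _ hp]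
    have hlen : items.length ≤ i.toNat := List.drop_eq_nil_iff.mp hdrop
    have : (items.drop prev.toNat).take (i.toNat - prev.toNat) = items.drop prev.toNat := by
      apply List.take_of_length_le
      simp only [List.length_drop]
      omega
    rw [this]
    simp [pvG]
  | cons q qs ih =>
    intro items i prev R hp hpi hi hdrop
    have hiq : items[i.toNat]? = some q := by
      have h0 : (items.drop i.toNat)[0]? = some q := by rw [hdrop]; rfl
      rwa [List.getElem?_drop, Nat.add_zero] at h0
    have hdrop' : items.drop (i+1).toNat = qs := by
      have h1 : (i+1).toNat = i.toNat + 1 := by omega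
      rw [h1, ← List.drop_drop, hdrop, List.drop_one, List.tail_cons]
    rw [PySem.List.enumerate_cons, List.filter_cons]
    have h0 : decide ((0:Int) < i) = true := by simp; omega
    by_cases hc : (pvTruthy q && pvIsOr q) = true
    · rw [if_pos (by simp [hc, h0])]
      simp only [List.map_cons, List.foldl_cons]
      have hstep := ih items (i+1) (i+1)
        (R ++ [PySem.List.slice items (some prev) (some i)])
        (by omega) (by omega) (by omega) hdrop'
      simp only at hstep
      rw [hstep]
      have hself : (i+1).toNat - (i+1).toNat = 0 := by omega
      rw [hself, List.take_zero]
      rw [PySem.List.slice_toNat _ hp (by omega : (0:Int) ≤ i)]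
      simp [pvG, hc]
    · rw [if_neg (by simp_all)]
      have hstep := ih items (i+1) prev R hp (by omega) (by omega) hdrop'
      simp only at hstep
      rw [hstep]
      have htake : (items.drop prev.toNat).take ((i+1).toNat - prev.toNat)
          = (items.drop prev.toNat).take (i.toNat - prev.toNat) ++ [q] := by
        have h1 : (i+1).toNat - prev.toNat = (i.toNat - prev.toNat) + 1 := by omega
        rw [h1, List.take_add_one]
        have : (items.drop prev.toNat)[i.toNat - prev.toNat]? = some q := by
          rw [List.getElem?_drop]
          have : prev.toNat + (i.toNat - prev.toNat) = i.toNat := by omega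
          rw [this, hiq]
        rw [this]
        rfl
      rw [htake]
      simp only [pvG, hc]
      rw [if_neg (by simp_all)]

theorem get_subqueries_spec : Claim_equal_get_subqueries := by
  intro bq _ _
  unfold Spec_get_subqueries
  cases bq with
  | none => rfl
  | some l =>
    cases l with
    | nil => rfl
    | cons q qs =>
      have hA := pv_A_loop qs 1 [] [q] (by omega)
      have hB := pv_B_loop qs (q :: qs) 1 0 [] (by omega) (by omega) (by omega) rfl
      simp only [List.length_nil, List.nil_append] at hA
      simp only [Int.toNat_one, Int.toNat_zero, Nat.sub_zero, List.drop_zero,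
        List.drop_one, List.tail_cons, List.take_succ_cons, List.take_zero,
        List.nil_append] at hB
      have e1 : (pvTruthy q && pvIsOr q && decide ((0:Int) < 0)) = false := by simp
      simp only [get_subqueries, get_subqueries_alt, PySem.List.enumerate_cons,
        List.foldl_cons, List.filter_cons, e1, Bool.false_eq_true, if_false, zero_add]
      rw [show (([[]] : List (List (Option (List (String × Bool))))).modify 0
            (fun g => g ++ [q])) = [[q]] from rfl]
      rw [hA, hB]
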